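-- pv_equiv track=rewrite | github.com/pypi-data/pypi-mirror-9 | packages/state-machine-crawler/state-machine-crawler-5.0.1.tar.gz/state-machine-crawler-5.0.1/state_machine_crawler/state_machine_crawler.py | _create_transition_map_with_exclusions
-- ===== SOURCE A (Python) =====
-- def _create_transition_map_with_exclusions(graph, entry_point, state_exclusion_list=None,
--                                            transition_exclusion_list=None,
--                                            filtered_graph=None):
--     """ Creates a sub_graph of a @graph with an assumption that a bunch of nodes from @state_exclusion_list are not
--     reachable
--     """
--     filtered_graph = filtered_graph or {}
--     state_exclusion_list = state_exclusion_list or []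
--     transition_exclusion_list = transition_exclusion_list or []
--     if entry_point in state_exclusion_list:
--         return {}
--     if entry_point in filtered_graph or entry_point not in graph:
--         return filtered_graph
--     filtered_graph[entry_point] = filtered_children = set()
--     for child_node in graph[entry_point]:
--         if (entry_point, child_node) in transition_exclusion_list:
--             continue
--         if _create_transition_map_with_exclusions(graph, child_node, state_exclusion_list, transition_exclusion_list,
--                                                   filtered_graph):
--             filtered_children.add(child_node)
--     return filtered_graph
-- ===== SOURCE B (Python) =====
-- def _create_transition_map_with_exclusions(graph, entry_point, state_exclusion_list=None,
--                                            transition_exclusion_list=None,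
--                                            filtered_graph=None):
--     """Iterative DFS with an explicit stack instead of recursion."""
--     filtered_graph = filtered_graph or {}
--     state_exclusion_list = state_exclusion_list or []
--     transition_exclusion_list = transition_exclusion_list or []
--     if entry_point in state_exclusion_list:
--         return {}
--     pending = [entry_point]
--     while pending:
--         node = pending.pop()
--         if node in filtered_graph or node not in graph:
--             continue
--         kids = [c for c in graph[node] if (node, c) not in transition_exclusion_list]
--         live = [c for c in kids if c not in state_exclusion_list]
--         filtered_graph[node] = set(live)
--         pending.extend(reversed(live))
--     return filtered_graph
-- ===== Notes on version B (the rewrite author's own statement) =====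
-- stated objective: alternative
-- what changed: A's recursive DFS (child sets grown one element at a time after each recursive call, truthiness of the returned dict deciding membership) is replaced by an iterative worklist loop with an explicit stack: pop a node, skip it if already emitted or absent from the graph, otherwise emit its whole filtered child-set at once and push the surviving children.
import Mathlib
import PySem

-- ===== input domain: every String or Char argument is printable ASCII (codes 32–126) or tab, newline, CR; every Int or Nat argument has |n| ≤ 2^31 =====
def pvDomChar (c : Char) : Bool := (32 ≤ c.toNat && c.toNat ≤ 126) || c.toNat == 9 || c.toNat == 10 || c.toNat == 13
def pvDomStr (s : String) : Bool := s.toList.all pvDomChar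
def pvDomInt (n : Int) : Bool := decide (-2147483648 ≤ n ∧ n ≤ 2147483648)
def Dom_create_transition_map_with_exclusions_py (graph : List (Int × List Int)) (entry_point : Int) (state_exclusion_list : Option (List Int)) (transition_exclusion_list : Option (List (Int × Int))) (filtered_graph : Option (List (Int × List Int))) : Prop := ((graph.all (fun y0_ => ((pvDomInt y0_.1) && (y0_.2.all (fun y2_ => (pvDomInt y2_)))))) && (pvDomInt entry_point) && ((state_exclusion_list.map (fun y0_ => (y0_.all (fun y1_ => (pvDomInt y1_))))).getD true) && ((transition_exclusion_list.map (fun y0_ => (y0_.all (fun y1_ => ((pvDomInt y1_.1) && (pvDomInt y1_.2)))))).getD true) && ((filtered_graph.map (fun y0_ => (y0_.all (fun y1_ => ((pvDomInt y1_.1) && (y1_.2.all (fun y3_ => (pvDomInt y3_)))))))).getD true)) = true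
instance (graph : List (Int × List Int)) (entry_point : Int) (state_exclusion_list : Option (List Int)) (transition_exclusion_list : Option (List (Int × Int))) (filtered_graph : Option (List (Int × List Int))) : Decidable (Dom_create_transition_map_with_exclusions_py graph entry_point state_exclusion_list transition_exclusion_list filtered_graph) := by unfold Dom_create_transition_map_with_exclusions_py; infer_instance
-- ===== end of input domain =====

-- B rewrites A's recursive DFS as an iterative loop over an explicit stack (same return value;
-- like A, B mutates a non-empty `filtered_graph` argument in place — the equivalence proved here
-- is about the RETURN value).

-- ===== PORT A =====
-- recursive DFS; `fuel` only makes the Python recursion structural (graph.length + 1 is enough: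
-- every recursion level first inserts a fresh graph key into the shared dict).
-- Result is the pair (shared mutated dict, Python return value).
def pvVisitA (graph : List (Int × List Int)) (X : List Int) (T : List (Int × Int)) :
    Nat → PySem.Dict Int (List Int) → Int → PySem.Dict Int (List Int) × PySem.Dict Int (List Int)
  | 0, fg, _ => (fg, fg)  -- unreachable with the fuel supplied below
  | fuel + 1, fg, n =>
    if X.contains n then (fg, PySem.Dict.empty)
    else if fg.contains n || !((PySem.Dict.mk graph).contains n) then (fg, fg)
    else
      let fg2 := ((PySem.Dict.mk graph).getD n []).foldl
        (fun d c =>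
          if T.contains (n, c) then d
          else
            let p := pvVisitA graph X T fuel d c
            if p.2.items.isEmpty then p.1
            else PySem.Dict.modify p.1 n [] (fun s => PySem.Set.add s c))
        (fg.insert n PySem.Set.empty)
      (fg2, fg2)

def create_transition_map_with_exclusions_py (graph : List (Int × List Int)) (entry_point : Int) (state_exclusion_list : Option (List Int)) (transition_exclusion_list : Option (List (Int × Int))) (filtered_graph : Option (List (Int × List Int))) : List (Int × List Int) :=
  let X := state_exclusion_list.getD []
  let T := transition_exclusion_list.getD []
  let fg0 := PySem.Dict.mk (filtered_graph.getD [])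
  (pvVisitA graph X T (graph.length + 1) fg0 entry_point).2.items

-- ===== PORT B =====
-- number of graph keys not yet in the filtered dict: the DFS measure
def pvMu (graph : List (Int × List Int)) (fg : PySem.Dict Int (List Int)) : Nat :=
  ((graph.map Prod.fst).filter (fun k => !(fg.contains k))).length

theorem pvFilterLenMono (p q : Int → Bool) (himp : ∀ a, q a = true → p a = true) :
    ∀ l : List Int, (l.filter q).length ≤ (l.filter p).length := by
  intro l
  induction l with
  | nil => exact Nat.le_refl _
  | cons a t ih =>
    rw [List.filter_cons, List.filter_cons]
    by_cases hq : q a = true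
    · rw [if_pos hq, if_pos (himp a hq)]; simpa using ih
    · rw [if_neg hq]
      by_cases hp : p a = true
      · rw [if_pos hp]; exact Nat.le_succ_of_le ih
      · rw [if_neg hp]; exact ih

theorem pvMuStrict (graph : List (Int × List Int)) (fg : PySem.Dict Int (List Int)) (n : Int)
    (v : List Int) (h1 : (PySem.Dict.mk graph).contains n = true) (h2 : fg.contains n = false) :
    pvMu graph (fg.insert n v) < pvMu graph fg := by
  have himp : ∀ k, (!((fg.insert n v).contains k)) = true → (!(fg.contains k)) = true := by
    intro k hk
    rw [PySem.Dict.contains_insert] at hk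
    simp only [Bool.not_eq_true', Bool.or_eq_false_iff] at hk
    simp [hk.2]
  have hmem : n ∈ graph.map Prod.fst := (PySem.Dict.contains_iff_mem_keys _ n).1 h1
  unfold pvMu
  have key : ∀ l : List Int, n ∈ l →
      (l.filter (fun k => !((fg.insert n v).contains k))).length
        < (l.filter (fun k => !(fg.contains k))).length := by
    intro l
    induction l with
    | nil => intro hm; cases hm
    | cons a t ih =>
      intro hm
      rw [List.filter_cons, List.filter_cons]
      by_cases han : a = n
      · subst han
        have hqa : (!((fg.insert a v).contains a)) = false := by
          simp [PySem.Dict.contains_insert_self]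
        have hpa : (!(fg.contains a)) = true := by simp [h2]
        rw [hqa, hpa, if_neg Bool.false_ne_true, if_pos rfl]
        exact Nat.lt_succ_of_le (pvFilterLenMono _ _ himp t)
      · have hm' : n ∈ t := by
          cases List.mem_cons.mp hm with
          | inl he => exact absurd he.symm han
          | inr ht => exact ht
        by_cases hq : (!((fg.insert n v).contains a)) = true
        · rw [if_pos hq, if_pos (himp a hq)]
          exact Nat.succ_lt_succ (ih hm')
        · rw [if_neg hq]
          by_cases hp : (!(fg.contains a)) = true
          · rw [if_pos hp]; exact Nat.lt_succ_of_lt (ih hm')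
          · rw [if_neg hp]; exact ih hm'
  exact key _ hmem

-- iterative DFS over an explicit stack (head of the list = top of the Python stack)
def pvLoopB (graph : List (Int × List Int)) (X : List Int) (T : List (Int × Int))
    (fg : PySem.Dict Int (List Int)) (stack : List Int) : PySem.Dict Int (List Int) :=
  match stack with
  | [] => fg
  | n :: s =>
    if h : fg.contains n || !((PySem.Dict.mk graph).contains n) then
      pvLoopB graph X T fg s
    else
      let kids := ((PySem.Dict.mk graph).getD n []).filter (fun c => !(T.contains (n, c)))
      let live := kids.filter (fun c => !(X.contains c))
      pvLoopB graph X T (fg.insert n (PySem.Set.ofList live)) (live ++ s)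
  termination_by (pvMu graph fg, stack.length)
  decreasing_by
  · exact Prod.Lex.right _ (Nat.lt_succ_self _)
  · simp only [Bool.or_eq_true, Bool.not_eq_true', not_or, Bool.not_eq_true] at h
    exact Prod.Lex.left _ _ (pvMuStrict graph fg n _ (by simpa using h.2) h.1)

def create_transition_map_with_exclusions_py_alt (graph : List (Int × List Int)) (entry_point : Int) (state_exclusion_list : Option (List Int)) (transition_exclusion_list : Option (List (Int × Int))) (filtered_graph : Option (List (Int × List Int))) : List (Int × List Int) :=
  let X := state_exclusion_list.getD []
  let T := transition_exclusion_list.getD []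
  let fg0 := PySem.Dict.mk (filtered_graph.getD [])
  if X.contains entry_point then []
  else (pvLoopB graph X T fg0 [entry_point]).items

-- ===== PRECONDITION & SPEC =====
def Spec_create_transition_map_with_exclusions_py (graph : List (Int × List Int)) (entry_point : Int) (state_exclusion_list : Option (List Int)) (transition_exclusion_list : Option (List (Int × Int))) (filtered_graph : Option (List (Int × List Int))) (out : List (Int × List Int)) : Prop := out = create_transition_map_with_exclusions_py_alt graph entry_point state_exclusion_list transition_exclusion_list filtered_graph
instance (graph : List (Int × List Int)) (entry_point : Int) (state_exclusion_list : Option (List Int)) (transition_exclusion_list : Option (List (Int × Int))) (filtered_graph : Option (List (Int × List Int))) (out : List (Int × List Int)) : Decidable (Spec_create_transition_map_with_exclusions_py graph entry_point state_exclusion_list transition_exclusion_list filtered_graph out) := by unfold Spec_create_transition_map_with_exclusions_py; infer_instance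

-- ===== CLAIM (what is proved, stated in full; the proofs are below) =====
def Claim_equal_create_transition_map_with_exclusions_py : Prop := ∀ (graph : List (Int × List Int)) (entry_point : Int) (state_exclusion_list : Option (List Int)) (transition_exclusion_list : Option (List (Int × Int))) (filtered_graph : Option (List (Int × List Int))), Dom_create_transition_map_with_exclusions_py graph entry_point state_exclusion_list transition_exclusion_list filtered_graph → Spec_create_transition_map_with_exclusions_py graph entry_point state_exclusion_list transition_exclusion_list filtered_graph (create_transition_map_with_exclusions_py graph entry_point state_exclusion_list transition_exclusion_list filtered_graph)

-- ===== LEMMAS AND PROOFS =====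

-- A's inner loop body, named (proof-only helper; definitionally the lambda in pvVisitA)
def pvStepA (graph : List (Int × List Int)) (X : List Int) (T : List (Int × Int)) (fuel : Nat) (n : Int) :
    PySem.Dict Int (List Int) → Int → PySem.Dict Int (List Int) := fun d c =>
  if T.contains (n, c) then d
  else
    let p := pvVisitA graph X T fuel d c
    if p.2.items.isEmpty then p.1
    else PySem.Dict.modify p.1 n [] (fun s => PySem.Set.add s c)

-- A's inner loop body with the dead branches removed (valid for children that pass both filters)
def pvStepA' (graph : List (Int × List Int)) (X : List Int) (T : List (Int × Int)) (fuel : Nat) (n : Int) :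
    PySem.Dict Int (List Int) → Int → PySem.Dict Int (List Int) := fun d c =>
  ((pvVisitA graph X T fuel d c).1).insert n
    (PySem.Set.add ((pvVisitA graph X T fuel d c).1.getD n []) c)

theorem pvVisitASucc (graph : List (Int × List Int)) (X : List Int) (T : List (Int × Int)) (fuel : Nat)
    (fg : PySem.Dict Int (List Int)) (n : Int) :
    pvVisitA graph X T (fuel + 1) fg n =
      if X.contains n then (fg, PySem.Dict.empty)
      else if fg.contains n || !((PySem.Dict.mk graph).contains n) then (fg, fg)
      else
        (((PySem.Dict.mk graph).getD n []).foldl (pvStepA graph X T fuel n) (fg.insert n PySem.Set.empty),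
         ((PySem.Dict.mk graph).getD n []).foldl (pvStepA graph X T fuel n) (fg.insert n PySem.Set.empty)) := rfl

theorem pvModifyEq (d : PySem.Dict Int (List Int)) (k : Int) (d0 : List Int) (f : List Int → List Int) :
    PySem.Dict.modify d k d0 f = d.insert k (f (d.getD k d0)) := rfl

theorem pvNonempty (d : PySem.Dict Int (List Int)) (n : Int) (h : d.contains n = true) :
    d.items.isEmpty = false := by
  have hm : n ∈ d.items.map Prod.fst := (PySem.Dict.contains_iff_mem_keys d n).1 h
  cases hi : d.items with
  | nil => rw [hi] at hm; simp at hm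
  | cons a t => simp

theorem pvFilterNilOfNotContains (d : PySem.Dict Int (List Int)) (n : Int) (h : d.contains n = false) :
    d.items.filter (fun p => p.1 == n) = [] := by
  rw [List.filter_eq_nil_iff]
  intro p hp hbeq
  have hk : n ∈ d.keys := by
    have : p.1 = n := beq_iff_eq.mp hbeq
    exact this ▸ List.mem_map_of_mem hp
  have := (PySem.Dict.contains_iff_mem_keys d n).2 hk
  rw [h] at this; cases this

theorem pvContainsOfFilter (d : PySem.Dict Int (List Int)) (n : Int) (v : List Int) (r : List (Int × List Int))
    (h : d.items.filter (fun p => p.1 == n) = (n, v) :: r) : d.contains n = true := by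
  have hm : (n, v) ∈ d.items.filter (fun p => p.1 == n) := h ▸ List.mem_cons_self ..
  have hm' : (n, v) ∈ d.items := (List.mem_filter.mp hm).1
  rw [PySem.Dict.contains_iff_mem_keys]
  exact List.mem_map_of_mem hm'

theorem pvMapOverwriteFilterNe (l : List (Int × List Int)) (n c : Int) (v : List Int) (hc : c ≠ n) :
    (l.map (fun p => if (p.1 == c) = true then (c, v) else p)).filter (fun p => p.1 == n)
      = l.filter (fun p => p.1 == n) := by
  induction l with
  | nil => rfl
  | cons p t ih =>
    rw [List.map_cons, List.filter_cons, List.filter_cons]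
    by_cases hp : (p.1 == c) = true
    · have h2 : (p.1 == n) = false := by simp [beq_iff_eq.mp hp, hc]
      have e1 : ((((c, v) : Int × List Int)).1 == n) = false := by simp [hc]
      rw [if_pos hp, e1, h2]; simpa using ih
    · rw [if_neg hp]
      by_cases hpn : (p.1 == n) = true
      · rw [hpn]; simpa using ih
      · have h2 : (p.1 == n) = false := by simpa using hpn
        rw [h2]; simpa using ih

theorem pvMapOverwriteFilterSelf (l : List (Int × List Int)) (n : Int) (v : List Int) :
    (l.map (fun p => if (p.1 == n) = true then (n, v) else p)).filter (fun p => p.1 == n)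
      = (l.filter (fun p => p.1 == n)).map (fun _ => (n, v)) := by
  induction l with
  | nil => rfl
  | cons p t ih =>
    rw [List.map_cons, List.filter_cons, List.filter_cons]
    by_cases hp : (p.1 == n) = true
    · have e1 : ((((n, v) : Int × List Int)).1 == n) = true := by simp
      rw [if_pos hp, e1]; simpa [beq_iff_eq.mp hp] using ih
    · have h2 : (p.1 == n) = false := by simpa using hp
      rw [h2]; simpa [h2] using ih

theorem pvInsertFilterNe (d : PySem.Dict Int (List Int)) (n c : Int) (v : List Int) (hc : c ≠ n) :
    ((d.insert c v).items.filter (fun p => p.1 == n)) = d.items.filter (fun p => p.1 == n) := by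
  by_cases hcc : d.contains c = true
  · rw [PySem.Dict.items_insert_of_contains d v hcc]
    exact pvMapOverwriteFilterNe d.items n c v hc
  · rw [PySem.Dict.items_insert_of_not_contains d v (by simpa using hcc), List.filter_append]
    have : (((c, v) : Int × List Int).1 == n) = false := by simp [hc]
    simp [this]

theorem pvInsertFilterSelf (d : PySem.Dict Int (List Int)) (n : Int) (v : List Int) (h : d.contains n = true) :
    ((d.insert n v).items.filter (fun p => p.1 == n)) = (d.items.filter (fun p => p.1 == n)).map (fun _ => (n, v)) := by
  rw [PySem.Dict.items_insert_of_contains d v h]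
  exact pvMapOverwriteFilterSelf d.items n v

theorem pvInsertId (d : PySem.Dict Int (List Int)) (n : Int) (v : List Int)
    (h : d.items.filter (fun p => p.1 == n) = [(n, v)]) : d.insert n v = d := by
  have hc : d.contains n = true := pvContainsOfFilter d n v [] h
  apply PySem.Dict.ext
  rw [PySem.Dict.items_insert_of_contains d v hc]
  have hcong : ∀ p ∈ d.items, (if (p.1 == n) = true then ((n, v) : Int × List Int) else p) = id p := by
    intro p hp
    by_cases hpn : (p.1 == n) = true
    · have hpf : p ∈ d.items.filter (fun p => p.1 == n) := List.mem_filter.mpr ⟨hp, hpn⟩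
      rw [h, List.mem_singleton] at hpf
      rw [if_pos hpn, hpf]; rfl
    · rw [if_neg hpn]; rfl
  rw [List.map_congr_left hcong, List.map_id]

theorem pvInsertComm (d : PySem.Dict Int (List Int)) (n c : Int) (S w : List Int)
    (hn : d.contains n = true) (hnc : n ≠ c) :
    (d.insert n S).insert c w = (d.insert c w).insert n S := by
  have hcn : c ≠ n := fun e => hnc e.symm
  have h2 : (d.insert c w).contains n = true := by
    rw [PySem.Dict.contains_insert]; simp [hn]
  by_cases hcc : d.contains c = true
  · have h1 : (d.insert n S).contains c = true := by
      rw [PySem.Dict.contains_insert]; simp [hcc]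
    apply PySem.Dict.ext
    rw [PySem.Dict.items_insert_of_contains _ w h1, PySem.Dict.items_insert_of_contains d S hn,
        PySem.Dict.items_insert_of_contains _ S h2, PySem.Dict.items_insert_of_contains d w hcc,
        List.map_map, List.map_map]
    apply List.map_congr_left
    intro p _
    simp only [Function.comp]
    by_cases hpn : (p.1 == n) = true
    · have hpc : (p.1 == c) = false := by simp [beq_iff_eq.mp hpn, hnc]
      simp [hpn, hpc, hcn, hnc]
    · by_cases hpc : (p.1 == c) = true
      · simp [hpn, hpc, hcn, hnc]
      · simp [hpn, hpc]
  · have hcc' : d.contains c = false := by simpa using hcc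
    have h1 : (d.insert n S).contains c = false := by
      rw [PySem.Dict.contains_insert]; simp [hcc', hcn]
    apply PySem.Dict.ext
    rw [PySem.Dict.items_insert_of_not_contains _ w h1, PySem.Dict.items_insert_of_contains d S hn,
        PySem.Dict.items_insert_of_contains _ S h2, PySem.Dict.items_insert_of_not_contains d w hcc',
        List.map_append]
    simp [hcn]

theorem pvVisitASnd (graph : List (Int × List Int)) (X : List Int) (T : List (Int × Int)) (fuel : Nat)
    (fg : PySem.Dict Int (List Int)) (n : Int) (h : X.contains n = false) :
    (pvVisitA graph X T fuel fg n).2 = (pvVisitA graph X T fuel fg n).1 := by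
  cases fuel with
  | zero => rfl
  | succ f =>
    rw [pvVisitASucc, if_neg (by simpa using h)]
    split <;> rfl

-- visitA never touches the entry of an already-present key n: its first lookup and its key-n items are preserved
theorem pvPres (graph : List (Int × List Int)) (X : List Int) (T : List (Int × Int)) :
    ∀ (fuel : Nat) (d : PySem.Dict Int (List Int)) (c n : Int), d.contains n = true →
    ((pvVisitA graph X T fuel d c).1.get? n = d.get? n ∧
     (pvVisitA graph X T fuel d c).1.items.filter (fun p => p.1 == n)
       = d.items.filter (fun p => p.1 == n)) := by
  intro fuel
  induction fuel with
  | zero => intro d c n _; exact ⟨rfl, rfl⟩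
  | succ f ih =>
    intro d c n h
    rw [pvVisitASucc]
    by_cases hx : X.contains c = true
    · rw [if_pos hx]; exact ⟨rfl, rfl⟩
    · rw [if_neg hx]
      by_cases hg : (d.contains c || !((PySem.Dict.mk graph).contains c)) = true
      · rw [if_pos hg]; exact ⟨rfl, rfl⟩
      · rw [if_neg hg]
        have hdc : d.contains c = false := by
          cases hcc : d.contains c with
          | false => rfl
          | true => rw [hcc] at hg; simp at hg
        have hcn : c ≠ n := fun e => by rw [e, h] at hdc; cases hdc
        have hnc : n ≠ c := fun e => hcn e.symm
        have main : ∀ (l : List Int) (e : PySem.Dict Int (List Int)),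
            e.contains n = true → e.get? n = d.get? n →
            e.items.filter (fun p => p.1 == n) = d.items.filter (fun p => p.1 == n) →
            ((l.foldl (pvStepA graph X T f c) e).get? n = d.get? n ∧
             (l.foldl (pvStepA graph X T f c) e).items.filter (fun p => p.1 == n)
               = d.items.filter (fun p => p.1 == n)) := by
          intro l
          induction l with
          | nil => intro e _ h1 h2; exact ⟨h1, h2⟩
          | cons a t iht =>
            intro e hec h1 h2
            rw [List.foldl_cons]
            by_cases ht : T.contains (c, a) = true
            · rw [show pvStepA graph X T f c e a = e from by rw [pvStepA, if_pos ht]]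
              exact iht e hec h1 h2
            · have hp := ih e a n hec
              have hpc : (pvVisitA graph X T f e a).1.contains n = true := by
                rw [PySem.Dict.contains_eq_isSome_get?, hp.1, ← PySem.Dict.contains_eq_isSome_get?]
                exact hec
              cases hie : (pvVisitA graph X T f e a).2.items.isEmpty with
              | true =>
                rw [show pvStepA graph X T f c e a = (pvVisitA graph X T f e a).1 from by
                  rw [pvStepA, if_neg ht]; simp [hie]]
                exact iht _ hpc (hp.1.trans h1) (hp.2.trans h2)
              | false =>
                rw [show pvStepA graph X T f c e a
                    = ((pvVisitA graph X T f e a).1).insert c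
                        (PySem.Set.add ((pvVisitA graph X T f e a).1.getD c []) a) from by
                  rw [pvStepA, if_neg ht]; simp [hie, pvModifyEq]]
                apply iht
                · rw [PySem.Dict.contains_insert]; simp [hpc]
                · rw [PySem.Dict.get?_insert_of_ne _ _ hnc, hp.1]; exact h1
                · rw [pvInsertFilterNe _ n c _ hcn, hp.2]; exact h2
        exact main _ _ (by rw [PySem.Dict.contains_insert]; simp [h])
          (PySem.Dict.get?_insert_of_ne _ _ hnc) (pvInsertFilterNe d n c PySem.Set.empty hcn)

theorem pvContPres (graph : List (Int × List Int)) (X : List Int) (T : List (Int × Int)) (fuel : Nat)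
    (d : PySem.Dict Int (List Int)) (c n : Int) (h : d.contains n = true) :
    (pvVisitA graph X T fuel d c).1.contains n = true := by
  rw [PySem.Dict.contains_eq_isSome_get?, (pvPres graph X T fuel d c n h).1,
    ← PySem.Dict.contains_eq_isSome_get?]; exact h

-- A's whole inner loop never removes an already-present key
theorem pvStepAFoldCont (graph : List (Int × List Int)) (X : List Int) (T : List (Int × Int))
    (fuel : Nat) (m n : Int) :
    ∀ (l : List Int) (e : PySem.Dict Int (List Int)), e.contains n = true →
    (l.foldl (pvStepA graph X T fuel m) e).contains n = true := by
  intro l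
  induction l with
  | nil => intro e he; exact he
  | cons a t iht =>
    intro e he
    rw [List.foldl_cons]
    by_cases ht : T.contains (m, a) = true
    · rw [show pvStepA graph X T fuel m e a = e from by rw [pvStepA, if_pos ht]]
      exact iht e he
    · have hpc := pvContPres graph X T fuel e a n he
      cases hie : (pvVisitA graph X T fuel e a).2.items.isEmpty with
      | true =>
        rw [show pvStepA graph X T fuel m e a = (pvVisitA graph X T fuel e a).1 from by
          rw [pvStepA, if_neg ht]; simp [hie]]
        exact iht _ hpc
      | false =>
        rw [show pvStepA graph X T fuel m e a
            = ((pvVisitA graph X T fuel e a).1).insert m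
                (PySem.Set.add ((pvVisitA graph X T fuel e a).1.getD m []) a) from by
          rw [pvStepA, if_neg ht]; simp [hie, pvModifyEq]]
        apply iht
        rw [PySem.Dict.contains_insert]; simp [hpc]

-- frame: changing the stored value of an already-present key n commutes with visitA
theorem pvFrame (graph : List (Int × List Int)) (X : List Int) (T : List (Int × Int)) :
    ∀ (fuel : Nat) (d : PySem.Dict Int (List Int)) (S : List Int) (n c : Int), d.contains n = true →
    ((pvVisitA graph X T fuel (d.insert n S) c).1 = ((pvVisitA graph X T fuel d c).1).insert n S ∧
     (pvVisitA graph X T fuel (d.insert n S) c).2.items.isEmpty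
       = (pvVisitA graph X T fuel d c).2.items.isEmpty) := by
  intro fuel
  induction fuel with
  | zero =>
    intro d S n c h
    refine ⟨rfl, ?_⟩
    show (d.insert n S).items.isEmpty = d.items.isEmpty
    rw [pvNonempty _ n (PySem.Dict.contains_insert_self d n S), pvNonempty d n h]
  | succ f ih =>
    intro d S n c h
    rw [pvVisitASucc, pvVisitASucc]
    by_cases hx : X.contains c = true
    · rw [if_pos hx, if_pos hx]; exact ⟨rfl, rfl⟩
    · rw [if_neg hx, if_neg hx]
      have hgeq : ((d.insert n S).contains c || !((PySem.Dict.mk graph).contains c))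
          = (d.contains c || !((PySem.Dict.mk graph).contains c)) := by
        by_cases hcn : c = n
        · subst hcn; rw [PySem.Dict.contains_insert_self, h]
        · rw [PySem.Dict.contains_insert]
          have : ((c == n) : Bool) = false := by simp [hcn]
          rw [this, Bool.false_or]
      rw [hgeq]
      by_cases hg : (d.contains c || !((PySem.Dict.mk graph).contains c)) = true
      · rw [if_pos hg, if_pos hg]
        refine ⟨rfl, ?_⟩
        show (d.insert n S).items.isEmpty = d.items.isEmpty
        rw [pvNonempty _ n (PySem.Dict.contains_insert_self d n S), pvNonempty d n h]
      · rw [if_neg hg, if_neg hg]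
        have hdc : d.contains c = false := by
          cases hcc : d.contains c with
          | false => rfl
          | true => rw [hcc] at hg; simp at hg
        have hcn : c ≠ n := fun e => by rw [e, h] at hdc; cases hdc
        have hnc : n ≠ c := fun e => hcn e.symm
        have hstart : (d.insert n S).insert c PySem.Set.empty
            = (d.insert c PySem.Set.empty).insert n S := pvInsertComm d n c S _ h hnc
        have main : ∀ (l : List Int) (e : PySem.Dict Int (List Int)), e.contains n = true →
            l.foldl (pvStepA graph X T f c) (e.insert n S)
              = (l.foldl (pvStepA graph X T f c) e).insert n S := by
          intro l
          induction l with
          | nil => intro e _; rfl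
          | cons a t iht =>
            intro e he
            rw [List.foldl_cons, List.foldl_cons]
            by_cases ht : T.contains (c, a) = true
            · rw [show pvStepA graph X T f c (e.insert n S) a = e.insert n S from by
                rw [pvStepA, if_pos ht]]
              rw [show pvStepA graph X T f c e a = e from by rw [pvStepA, if_pos ht]]
              exact iht e he
            · have hfr := ih e S n a he
              have hpc := pvContPres graph X T f e a n he
              cases hie : (pvVisitA graph X T f e a).2.items.isEmpty with
              | true =>
                have hie' : (pvVisitA graph X T f (e.insert n S) a).2.items.isEmpty = true :=
                  hfr.2.trans hie
                rw [show pvStepA graph X T f c (e.insert n S) a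
                    = (pvVisitA graph X T f (e.insert n S) a).1 from by
                  rw [pvStepA, if_neg ht]; simp [hie']]
                rw [show pvStepA graph X T f c e a = (pvVisitA graph X T f e a).1 from by
                  rw [pvStepA, if_neg ht]; simp [hie]]
                rw [hfr.1]
                exact iht _ hpc
              | false =>
                have hie' : (pvVisitA graph X T f (e.insert n S) a).2.items.isEmpty = false :=
                  hfr.2.trans hie
                rw [show pvStepA graph X T f c (e.insert n S) a
                    = ((pvVisitA graph X T f (e.insert n S) a).1).insert c
                        (PySem.Set.add ((pvVisitA graph X T f (e.insert n S) a).1.getD c []) a)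
                    from by rw [pvStepA, if_neg ht]; simp [hie', pvModifyEq]]
                rw [show pvStepA graph X T f c e a
                    = ((pvVisitA graph X T f e a).1).insert c
                        (PySem.Set.add ((pvVisitA graph X T f e a).1.getD c []) a) from by
                  rw [pvStepA, if_neg ht]; simp [hie, pvModifyEq]]
                rw [hfr.1, PySem.Dict.getD_insert_of_ne _ _ _ hcn,
                  pvInsertComm _ n c S _ hpc hnc]
                apply iht
                rw [PySem.Dict.contains_insert]; simp [hpc]
        have hconsS : (d.insert c PySem.Set.empty).contains n = true := by
          rw [PySem.Dict.contains_insert]; simp [h]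
        refine ⟨?_, ?_⟩
        · show ((PySem.Dict.mk graph).getD c []).foldl (pvStepA graph X T f c)
              ((d.insert n S).insert c PySem.Set.empty)
            = (((PySem.Dict.mk graph).getD c []).foldl (pvStepA graph X T f c)
              (d.insert c PySem.Set.empty)).insert n S
          rw [hstart]; exact main _ _ hconsS
        · show (((PySem.Dict.mk graph).getD c []).foldl (pvStepA graph X T f c)
              ((d.insert n S).insert c PySem.Set.empty)).items.isEmpty
            = (((PySem.Dict.mk graph).getD c []).foldl (pvStepA graph X T f c)
              (d.insert c PySem.Set.empty)).items.isEmpty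
          have hRc : (((PySem.Dict.mk graph).getD c []).foldl (pvStepA graph X T f c)
              (d.insert c PySem.Set.empty)).contains n = true :=
            pvStepAFoldCont graph X T f c n _ _ hconsS
          rw [hstart, main _ _ hconsS,
            pvNonempty _ n (PySem.Dict.contains_insert_self _ n S), pvNonempty _ n hRc]

-- on children passing both exclusion filters, A's loop body is pvStepA'
theorem pvFoldLive (graph : List (Int × List Int)) (X : List Int) (T : List (Int × Int)) (fuel : Nat) (n : Int)
    (hf : 1 ≤ fuel) :
    ∀ (l : List Int) (e : PySem.Dict Int (List Int)), e.contains n = true →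
    l.foldl (pvStepA graph X T fuel n) e
      = ((l.filter (fun c => !(T.contains (n, c)))).filter (fun c => !(X.contains c))).foldl
          (pvStepA' graph X T fuel n) e := by
  obtain ⟨f, rfl⟩ : ∃ f, fuel = f + 1 := ⟨fuel - 1, by omega⟩
  intro l
  induction l with
  | nil => intro e _; rfl
  | cons a t iht =>
    intro e he
    rw [List.foldl_cons, List.filter_cons]
    by_cases ht : T.contains (n, a) = true
    · have h1 : (!(T.contains (n, a))) = false := by simpa using ht
      rw [h1, if_neg Bool.false_ne_true]
      rw [show pvStepA graph X T (f + 1) n e a = e from by rw [pvStepA, if_pos ht]]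
      exact iht e he
    · have h1 : (!(T.contains (n, a))) = true := by simpa using ht
      rw [h1, if_pos rfl, List.filter_cons]
      by_cases hx : X.contains a = true
      · have h2 : (!(X.contains a)) = false := by simpa using hx
        rw [h2, if_neg Bool.false_ne_true]
        have hv : pvVisitA graph X T (f + 1) e a = (e, PySem.Dict.empty) := by
          rw [pvVisitASucc, if_pos hx]
        rw [show pvStepA graph X T (f + 1) n e a = e from by
          rw [pvStepA, if_neg ht]; simp [hv, PySem.Dict.empty]]
        exact iht e he
      · have hx' : X.contains a = false := by simpa using hx
        have h2 : (!(X.contains a)) = true := by simpa using hx'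
        rw [h2, if_pos rfl, List.foldl_cons]
        have hne : (pvVisitA graph X T (f + 1) e a).2.items.isEmpty = false := by
          rw [pvVisitASnd graph X T (f + 1) e a hx']
          exact pvNonempty _ n (pvContPres graph X T (f + 1) e a n he)
        rw [show pvStepA graph X T (f + 1) n e a = pvStepA' graph X T (f + 1) n e a from by
          rw [pvStepA, pvStepA', if_neg ht]; simp [hne, pvModifyEq]]
        apply iht
        rw [pvStepA', PySem.Dict.contains_insert]; simp

-- the value accumulated at key n by A's loop is exactly the fold of Set.add
theorem pvFoldVal (graph : List (Int × List Int)) (X : List Int) (T : List (Int × Int)) (fuel : Nat) (n : Int) :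
    ∀ (l : List Int) (e : PySem.Dict Int (List Int)) (w : List Int),
    e.get? n = some w → e.items.filter (fun p => p.1 == n) = [(n, w)] →
    ((l.foldl (pvStepA' graph X T fuel n) e).items.filter (fun p => p.1 == n)
      = [(n, l.foldl PySem.Set.add w)]) := by
  intro l
  induction l with
  | nil => intro e w _ h2; exact h2
  | cons a t iht =>
    intro e w h1 h2
    rw [List.foldl_cons, List.foldl_cons]
    have hec : e.contains n = true := by rw [PySem.Dict.contains_eq_isSome_get?, h1]; rfl
    have hp := pvPres graph X T fuel e a n hec
    have hg : (pvVisitA graph X T fuel e a).1.getD n [] = w := by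
      rw [PySem.Dict.getD_eq_get?_getD, hp.1, h1]; rfl
    have hpc : (pvVisitA graph X T fuel e a).1.contains n = true :=
      pvContPres graph X T fuel e a n hec
    apply iht
    · rw [pvStepA', PySem.Dict.get?_insert_self, hg]
    · rw [pvStepA', pvInsertFilterSelf _ n _ hpc, hp.2, h2, hg]
      rfl

theorem pvStepCont (graph : List (Int × List Int)) (X : List Int) (T : List (Int × Int)) (fuel : Nat)
    (n : Int) (d : PySem.Dict Int (List Int)) (c k : Int) (hn : d.contains n = true) (hk : d.contains k = true) :
    (pvStepA' graph X T fuel n d c).contains k = true := by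
  rw [pvStepA', PySem.Dict.contains_insert, pvContPres graph X T fuel d c k hk, Bool.or_true]

theorem pvMuMono (graph : List (Int × List Int)) (d d' : PySem.Dict Int (List Int))
    (h : ∀ k, d.contains k = true → d'.contains k = true) : pvMu graph d' ≤ pvMu graph d := by
  unfold pvMu
  apply pvFilterLenMono
  intro a ha
  simp only [Bool.not_eq_true'] at ha ⊢
  cases hca : d.contains a with
  | false => rfl
  | true => rw [h a hca] at ha; cases ha

theorem pvMuPos (graph : List (Int × List Int)) (fg : PySem.Dict Int (List Int)) (n : Int)
    (h1 : (PySem.Dict.mk graph).contains n = true) (h2 : fg.contains n = false) : 1 ≤ pvMu graph fg := by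
  have hmem : n ∈ graph.map Prod.fst := (PySem.Dict.contains_iff_mem_keys _ n).1 h1
  have : n ∈ (graph.map Prod.fst).filter (fun k => !(fg.contains k)) :=
    List.mem_filter.mpr ⟨hmem, by simp [h2]⟩
  exact List.length_pos_of_mem this

theorem pvMuLe (graph : List (Int × List Int)) (fg : PySem.Dict Int (List Int)) :
    pvMu graph fg ≤ graph.length := by
  calc ((graph.map Prod.fst).filter _).length ≤ (graph.map Prod.fst).length := List.length_filter_le _ _
    _ = graph.length := List.length_map ..

theorem pvLoopBNil (graph : List (Int × List Int)) (X : List Int) (T : List (Int × Int))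
    (fg : PySem.Dict Int (List Int)) : pvLoopB graph X T fg [] = fg := by
  rw [pvLoopB]

theorem pvLoopBConsTrue (graph : List (Int × List Int)) (X : List Int) (T : List (Int × Int))
    (fg : PySem.Dict Int (List Int)) (n : Int) (s : List Int)
    (h : (fg.contains n || !((PySem.Dict.mk graph).contains n)) = true) :
    pvLoopB graph X T fg (n :: s) = pvLoopB graph X T fg s := by
  rw [pvLoopB, dif_pos h]

theorem pvLoopBConsFalse (graph : List (Int × List Int)) (X : List Int) (T : List (Int × Int))
    (fg : PySem.Dict Int (List Int)) (n : Int) (s : List Int)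
    (h : (fg.contains n || !((PySem.Dict.mk graph).contains n)) = false) :
    pvLoopB graph X T fg (n :: s)
      = pvLoopB graph X T
          (fg.insert n (PySem.Set.ofList
            ((((PySem.Dict.mk graph).getD n []).filter (fun c => !(T.contains (n, c)))).filter
              (fun c => !(X.contains c)))))
          (((((PySem.Dict.mk graph).getD n []).filter (fun c => !(T.contains (n, c)))).filter
              (fun c => !(X.contains c))) ++ s) := by
  rw [pvLoopB, dif_neg (by rw [h]; exact Bool.false_ne_true)]

-- simulation: one recursive visit of A equals processing that node on B's stack
theorem pvSim (graph : List (Int × List Int)) (X : List Int) (T : List (Int × Int)) :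
    ∀ (fuel : Nat) (fg : PySem.Dict Int (List Int)) (n : Int) (s : List Int),
    pvMu graph fg + 1 ≤ fuel → X.contains n = false →
    pvLoopB graph X T fg (n :: s) = pvLoopB graph X T (pvVisitA graph X T fuel fg n).1 s := by
  intro fuel
  induction fuel with
  | zero => intro fg n s hmu hx; omega
  | succ f ih =>
    intro fg n s hmu hx
    by_cases hg : (fg.contains n || !((PySem.Dict.mk graph).contains n)) = true
    · rw [pvLoopBConsTrue graph X T fg n s hg, pvVisitASucc, if_neg (by simpa using hx),
        if_pos hg]
    · have hg' : (fg.contains n || !((PySem.Dict.mk graph).contains n)) = false := by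
        simpa using hg
      have hfgn : fg.contains n = false := by
        cases hcc : fg.contains n with
        | false => rfl
        | true => rw [hcc] at hg'; simp at hg'
      have hgn : (PySem.Dict.mk graph).contains n = true := by
        cases hcc : (PySem.Dict.mk graph).contains n with
        | true => rfl
        | false => rw [hcc] at hg'; simp at hg'
      rw [pvLoopBConsFalse graph X T fg n s hg', pvVisitASucc, if_neg (by simpa using hx),
        if_neg hg]
      have hf1 : 1 ≤ f := by have := pvMuPos graph fg n hgn hfgn; omega
      have hmuIns : pvMu graph (fg.insert n PySem.Set.empty) + 1 ≤ f := by
        have h1 := pvMuStrict graph fg n PySem.Set.empty hgn hfgn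
        omega
      have hA := pvFoldLive graph X T f n hf1 ((PySem.Dict.mk graph).getD n [])
        (fg.insert n PySem.Set.empty) (PySem.Dict.contains_insert_self fg n _)
      have inner : ∀ (l : List Int) (d : PySem.Dict Int (List Int)) (s' : List Int),
          (∀ c ∈ l, X.contains c = false) → d.contains n = true → pvMu graph d + 1 ≤ f →
          pvLoopB graph X T
              (d.insert n (PySem.Set.ofList
                ((((PySem.Dict.mk graph).getD n []).filter (fun c => !(T.contains (n, c)))).filter
                  (fun c => !(X.contains c)))))
              (l ++ s')
            = pvLoopB graph X T
                ((l.foldl (pvStepA' graph X T f n) d).insert n (PySem.Set.ofList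
                  ((((PySem.Dict.mk graph).getD n []).filter (fun c => !(T.contains (n, c)))).filter
                    (fun c => !(X.contains c)))))
                s' := by
        intro l
        induction l with
        | nil => intro d s' _ _ _; rfl
        | cons a t iht =>
          intro d s' hl hdn hmud
          have hxa : X.contains a = false := hl a (List.mem_cons_self ..)
          rw [List.cons_append]
          have hmuIns2 : pvMu graph
              (d.insert n (PySem.Set.ofList
                ((((PySem.Dict.mk graph).getD n []).filter (fun c => !(T.contains (n, c)))).filter
                  (fun c => !(X.contains c))))) + 1 ≤ f := by
            have hle : pvMu graph
                (d.insert n (PySem.Set.ofList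
                  ((((PySem.Dict.mk graph).getD n []).filter (fun c => !(T.contains (n, c)))).filter
                    (fun c => !(X.contains c))))) ≤ pvMu graph d :=
              pvMuMono graph d _ (fun k hk => by rw [PySem.Dict.contains_insert]; simp [hk])
            omega
          rw [ih _ a _ hmuIns2 hxa, (pvFrame graph X T f d _ n a hdn).1,
            show ∀ w : List Int, ((pvVisitA graph X T f d a).1).insert n w
                = (pvStepA' graph X T f n d a).insert n w from fun w => by
              rw [pvStepA', PySem.Dict.insert_insert_self],
            iht (pvStepA' graph X T f n d a) s' (fun c hc => hl c (List.mem_cons_of_mem a hc))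
              (by rw [pvStepA', PySem.Dict.contains_insert]; simp)
              (by have hle : pvMu graph (pvStepA' graph X T f n d a) ≤ pvMu graph d :=
                    pvMuMono graph d _ (fun k hk => pvStepCont graph X T f n d a k hdn hk)
                  omega),
            ← List.foldl_cons]
      have hliveX : ∀ c ∈ (((PySem.Dict.mk graph).getD n []).filter
          (fun c => !(T.contains (n, c)))).filter (fun c => !(X.contains c)),
          X.contains c = false := by
        intro c hc
        have := (List.mem_filter.mp hc).2
        simpa using this
      have hval := pvFoldVal graph X T f n
        ((((PySem.Dict.mk graph).getD n []).filter (fun c => !(T.contains (n, c)))).filter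
          (fun c => !(X.contains c)))
        (fg.insert n PySem.Set.empty) PySem.Set.empty
        (PySem.Dict.get?_insert_self fg n _)
        (by rw [PySem.Dict.items_insert_of_not_contains fg _ hfgn, List.filter_append,
            pvFilterNilOfNotContains fg n hfgn]
            simp)
      have hid : ((((((PySem.Dict.mk graph).getD n []).filter (fun c => !(T.contains (n, c)))).filter
            (fun c => !(X.contains c))).foldl (pvStepA' graph X T f n)
            (fg.insert n PySem.Set.empty)).insert n (PySem.Set.ofList
              ((((PySem.Dict.mk graph).getD n []).filter (fun c => !(T.contains (n, c)))).filter
                (fun c => !(X.contains c)))))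
          = ((((PySem.Dict.mk graph).getD n []).filter (fun c => !(T.contains (n, c)))).filter
            (fun c => !(X.contains c))).foldl (pvStepA' graph X T f n)
            (fg.insert n PySem.Set.empty) := by
        apply pvInsertId
        rw [PySem.Set.ofList_eq_foldl]
        exact hval
      calc pvLoopB graph X T
            (fg.insert n (PySem.Set.ofList
              ((((PySem.Dict.mk graph).getD n []).filter (fun c => !(T.contains (n, c)))).filter
                (fun c => !(X.contains c)))))
            (((((PySem.Dict.mk graph).getD n []).filter (fun c => !(T.contains (n, c)))).filter
              (fun c => !(X.contains c))) ++ s)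
          = pvLoopB graph X T
              ((fg.insert n PySem.Set.empty).insert n (PySem.Set.ofList
                ((((PySem.Dict.mk graph).getD n []).filter (fun c => !(T.contains (n, c)))).filter
                  (fun c => !(X.contains c)))))
              (((((PySem.Dict.mk graph).getD n []).filter (fun c => !(T.contains (n, c)))).filter
                (fun c => !(X.contains c))) ++ s) := by
            rw [PySem.Dict.insert_insert_self]
        _ = pvLoopB graph X T
              (((((((PySem.Dict.mk graph).getD n []).filter (fun c => !(T.contains (n, c)))).filter
                (fun c => !(X.contains c))).foldl (pvStepA' graph X T f n)
                (fg.insert n PySem.Set.empty)).insert n (PySem.Set.ofList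
                  ((((PySem.Dict.mk graph).getD n []).filter (fun c => !(T.contains (n, c)))).filter
                    (fun c => !(X.contains c))))))
              s :=
            inner _ (fg.insert n PySem.Set.empty) s hliveX
              (PySem.Dict.contains_insert_self fg n _) hmuIns
        _ = pvLoopB graph X T
              (((PySem.Dict.mk graph).getD n []).foldl (pvStepA graph X T f n)
                (fg.insert n PySem.Set.empty))
              s := by rw [hid, ← hA]

-- ===== VERDICT (by name: the statement is the Claim_ definition above) =====
theorem create_transition_map_with_exclusions_py_spec : Claim_equal_create_transition_map_with_exclusions_py := by
  intro graph entry_point state_exclusion_list transition_exclusion_list filtered_graph _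
  unfold Spec_create_transition_map_with_exclusions_py
  unfold create_transition_map_with_exclusions_py create_transition_map_with_exclusions_py_alt
  set X := state_exclusion_list.getD [] with hX
  set T := transition_exclusion_list.getD [] with hT
  set fg0 := PySem.Dict.mk (filtered_graph.getD []) with hfg0
  by_cases hx : X.contains entry_point = true
  · simp only [hx, if_true, pvVisitASucc, PySem.Dict.empty]
  · have hx' : X.contains entry_point = false := by simpa using hx
    simp only [hx', if_false]
    rw [pvVisitASnd graph X T _ fg0 entry_point hx']
    have hsim := pvSim graph X T (graph.length + 1) fg0 entry_point []
      (by have := pvMuLe graph fg0; omega) hx'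
    rw [pvLoopBNil] at hsim
    rw [← hsim, if_neg Bool.false_ne_true]
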